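-- pv_equiv track=rewrite | github.com/Mortafix/KryptomonLottery | utils/helpers.py | winner_summary
-- ===== SOURCE A (Python) =====
-- def winner_summary(overview, winners, json_winners):
--     wallets_win = [
--         (tickets, winners.get(wallet) or json_winners.get(wallet))
--         for wallet, tickets in overview.items()
--         if wallet in winners or wallet in json_winners
--     ]
--     winners_by_tickets = dict()
--     for tickets, generation in sorted(wallets_win):
--         if tickets not in winners_by_tickets:
--             winners_by_tickets[tickets] = [generation]
--         else:
--             winners_by_tickets[tickets] += [generation]
--     return winners_by_tickets
-- ===== SOURCE B (Python) =====
-- def winner_summary(overview, winners, json_winners):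
--     pairs = []
--     for wallet, tickets in overview.items():
--         gen = winners.get(wallet) or json_winners.get(wallet)
--         if gen is not None:
--             pairs.append((tickets, gen))
--     return {t: sorted(g for x, g in pairs if x == t)
--             for t in sorted({t for t, _ in pairs})}
-- ===== Notes on version B (the rewrite author's own statement) =====
-- stated objective: alternative
-- what changed: B never builds a grouping dict: one pass filters winning wallets by the truthiness of `winners.get(w) or json_winners.get(w)` itself (no membership test) into a flat (tickets, gen) list, then the result is a comprehension over the sorted set of distinct ticket values, each group collected by a per-key scan and sorted by generation; A instead globally sorts all pairs and folds them into a dict with a present/absent branch.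
-- outside the precondition, e.g. on winner_summary({'a': 1}, {'a': ''}, {}): A returns {1: [None]}, B returns {}
import Mathlib
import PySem

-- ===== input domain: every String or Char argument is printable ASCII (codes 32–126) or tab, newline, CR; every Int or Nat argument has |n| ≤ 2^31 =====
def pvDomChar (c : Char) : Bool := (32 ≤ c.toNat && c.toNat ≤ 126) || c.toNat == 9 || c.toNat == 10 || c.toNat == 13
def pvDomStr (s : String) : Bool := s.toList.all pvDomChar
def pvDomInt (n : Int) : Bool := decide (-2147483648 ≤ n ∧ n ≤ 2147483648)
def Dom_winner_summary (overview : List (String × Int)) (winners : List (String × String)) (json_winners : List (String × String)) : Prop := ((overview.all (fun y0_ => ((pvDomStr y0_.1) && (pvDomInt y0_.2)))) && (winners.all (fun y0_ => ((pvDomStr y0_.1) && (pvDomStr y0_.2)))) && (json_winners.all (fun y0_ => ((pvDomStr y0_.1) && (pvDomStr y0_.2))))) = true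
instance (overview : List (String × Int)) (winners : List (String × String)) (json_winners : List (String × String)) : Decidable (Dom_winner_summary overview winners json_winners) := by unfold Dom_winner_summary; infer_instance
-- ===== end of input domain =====

-- B drops A's grouping dict and membership filter: one pass keeps wallets whose
-- `winners.get(w) or json_winners.get(w)` is truthy-or-string, then maps over the sorted
-- distinct ticket values with a per-key scan (objective: alternative).

-- ===== PORT A =====
-- `winners.get(wallet) or json_winners.get(wallet)`; exact whenever the result is a string
-- (Pre_ excludes the inputs on which this Python expression yields None).
def pvGen (winnersD jsonD : PySem.Dict String String) (w : String) : String :=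
  match winnersD.get? w with
  | some s => if s = "" then (jsonD.get? w).getD "" else s
  | none => (jsonD.get? w).getD ""

-- wallets_win = [(tickets, winners.get(wallet) or json_winners.get(wallet))
--               for wallet, tickets in overview.items() if wallet in winners or wallet in json_winners]
def pvWalletsWin (overview : List (String × Int)) (winners : List (String × String)) (json_winners : List (String × String)) : List (Int × String) :=
  ((PySem.Dict.ofList overview).items.filter
      (fun p => (PySem.Dict.ofList winners).contains p.1 || (PySem.Dict.ofList json_winners).contains p.1)).map
    (fun p => (p.2, pvGen (PySem.Dict.ofList winners) (PySem.Dict.ofList json_winners) p.1))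

-- for tickets, generation in sorted(wallets_win): if tickets not in d: d[tickets] = [gen] else: d[tickets] += [gen]
-- (`d[tickets] += [gen]` read via getD: the key is present on that branch, so this is exact)
def winner_summary (overview : List (String × Int)) (winners : List (String × String)) (json_winners : List (String × String)) : List (Int × List String) :=
  ((PySem.List.sorted2 (pvWalletsWin overview winners json_winners) Prod.fst Prod.snd false).foldl
      (fun d p => if d.contains p.1 = false then d.insert p.1 [p.2]
                  else d.insert p.1 (d.getD p.1 [] ++ [p.2])) PySem.Dict.empty).items

-- ===== PORT B =====
-- gen = winners.get(wallet) or json_winners.get(wallet), as an Optional[str] (none = Python None,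
-- and `or` treats '' as falsy)
def altGen (winners json_winners : List (String × String)) (w : String) : Option String :=
  match (PySem.Dict.ofList winners).get? w with
  | some s => if s = "" then (PySem.Dict.ofList json_winners).get? w else some s
  | none => (PySem.Dict.ofList json_winners).get? w

-- pairs = []; for wallet, tickets in overview.items(): gen = …; if gen is not None: pairs.append((tickets, gen))
def altPairs (overview : List (String × Int)) (winners : List (String × String)) (json_winners : List (String × String)) : List (Int × String) :=
  (PySem.Dict.ofList overview).items.foldl
    (fun acc p =>
      match altGen winners json_winners p.1 with
      | some g => acc ++ [(p.2, g)]
      | none => acc) []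

-- {t: sorted(g for x, g in pairs if x == t) for t in sorted({t for t, _ in pairs})}
-- (a dict comprehension over distinct keys in this order IS this association list)
def winner_summary_alt (overview : List (String × Int)) (winners : List (String × String)) (json_winners : List (String × String)) : List (Int × List String) :=
  (PySem.List.sorted (PySem.Set.ofList ((altPairs overview winners json_winners).map Prod.fst)) (fun t => t) false).map
    (fun t => (t, PySem.List.sorted
        (((altPairs overview winners json_winners).filter (fun p => p.1 == t)).map Prod.snd) (fun g => g) false))

-- ===== PRECONDITION & SPEC =====
-- Pre_ excludes inputs where some overview wallet has winners[wallet] == '' and is absent from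
-- json_winners: there `winners.get(w) or json_winners.get(w)` is None, so A's result is not a
-- dict[int, list[str]] (and A's sort may even raise TypeError comparing None with str).
def Pre_winner_summary (overview : List (String × Int)) (winners : List (String × String)) (json_winners : List (String × String)) : Prop :=
  ∀ p ∈ (PySem.Dict.ofList overview).items,
    ¬((PySem.Dict.ofList winners).get? p.1 = some "" ∧ (PySem.Dict.ofList json_winners).get? p.1 = none)
instance (overview : List (String × Int)) (winners : List (String × String)) (json_winners : List (String × String)) : Decidable (Pre_winner_summary overview winners json_winners) := by unfold Pre_winner_summary; infer_instance

def pvWitness_winner_summary : (List (String × Int)) × (List (String × String)) × (List (String × String)) :=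
  ([("a", 2), ("b", 1)], [("a", "g1")], [("b", "g2")])

def Spec_winner_summary (overview : List (String × Int)) (winners : List (String × String)) (json_winners : List (String × String)) (out : List (Int × List String)) : Prop := out = winner_summary_alt overview winners json_winners
instance (overview : List (String × Int)) (winners : List (String × String)) (json_winners : List (String × String)) (out : List (Int × List String)) : Decidable (Spec_winner_summary overview winners json_winners out) := by unfold Spec_winner_summary; infer_instance

-- ===== CLAIM (what is proved, stated in full; the proofs are below) =====
def Claim_equal_winner_summary : Prop := ∀ (overview : List (String × Int)) (winners : List (String × String)) (json_winners : List (String × String)), Dom_winner_summary overview winners json_winners → Pre_winner_summary overview winners json_winners → Spec_winner_summary overview winners json_winners (winner_summary overview winners json_winners)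

-- ===== LEMMAS AND PROOFS =====

-- the weak lexicographic order sorted(list of (int, str) pairs) arranges by
def pvLexLe (a b : Int × String) : Prop := a.1 < b.1 ∨ (a.1 = b.1 ∧ a.2 ≤ b.2)

-- sorted2's `before` test refutes the reversed pair iff pvLexLe holds
theorem pvBefore_false_iff (a b : Int × String) :
    ((decide (b.1 < a.1) || (!decide (a.1 < b.1) && decide (b.2 < a.2))) = false) ↔ pvLexLe a b := by
  simp only [Bool.or_eq_false_iff, Bool.and_eq_false_iff, Bool.not_eq_false',
    decide_eq_false_iff_not, decide_eq_true_eq, pvLexLe]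
  constructor
  · rintro ⟨h1, h2 | h2⟩
    · exact Or.inl h2
    · rcases lt_or_eq_of_le (not_lt.mp h1) with hl | he
      · exact Or.inl hl
      · exact Or.inr ⟨he, not_lt.mp h2⟩
  · rintro (h | ⟨he, h2⟩)
    · exact ⟨asymm h, Or.inl h⟩
    · exact ⟨by omega, Or.inr (not_lt.mpr h2)⟩

theorem pvInsertBy_pairwise_lexle (x : Int × String) (ys : List (Int × String))
    (h : ys.Pairwise pvLexLe) :
    (PySem.List.insertBy (fun a b => decide (a.1 < b.1) || (!decide (b.1 < a.1) && decide (a.2 < b.2))) x ys).Pairwise pvLexLe := by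
  induction ys with
  | nil => simp [PySem.List.insertBy]
  | cons y t ih =>
    rw [List.pairwise_cons] at h
    unfold PySem.List.insertBy
    by_cases hb : (decide (x.1 < y.1) || (!decide (y.1 < x.1) && decide (x.2 < y.2))) = true
    · simp only [hb, if_pos]
      refine List.pairwise_cons.mpr ⟨?_, List.pairwise_cons.mpr h⟩
      intro z hz
      have hxy : pvLexLe x y := by
        rw [← pvBefore_false_iff]
        simp only [Bool.or_eq_true, Bool.and_eq_true, Bool.not_eq_true',
          decide_eq_true_eq, decide_eq_false_iff_not] at hb
        rcases hb with h1 | ⟨h1, h2⟩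
        · simp [asymm h1, h1]
        · simp [h1, asymm h2]
      rcases List.mem_cons.mp hz with rfl | hz
      · exact hxy
      · -- pvLexLe is transitive
        have hyz : pvLexLe y z := h.1 z hz
        unfold pvLexLe at hxy hyz ⊢
        rcases hxy with h1 | ⟨h1, h2⟩ <;> rcases hyz with h3 | ⟨h3, h4⟩
        · exact Or.inl (h1.trans h3)
        · exact Or.inl (h3 ▸ h1)
        · exact Or.inl (h1 ▸ h3)
        · exact Or.inr ⟨h1.trans h3, h2.trans h4⟩
    · simp only [Bool.not_eq_true] at hb
      simp only [hb, Bool.false_eq_true, if_false]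
      refine List.pairwise_cons.mpr ⟨?_, ih h.2⟩
      intro z hz
      rw [PySem.List.insertBy_mem_iff] at hz
      rcases hz with rfl | hz
      · rw [← pvBefore_false_iff]
        simpa using hb
      · exact h.1 z hz

theorem pvSorted2_pairwise (ws : List (Int × String)) :
    (PySem.List.sorted2 ws Prod.fst Prod.snd false).Pairwise pvLexLe := by
  unfold PySem.List.sorted2
  suffices h : ∀ (acc : List (Int × String)), acc.Pairwise pvLexLe →
      (ws.foldl (fun acc x => PySem.List.insertBy (fun a b => decide (a.1 < b.1) || (!decide (b.1 < a.1) && decide (a.2 < b.2))) x acc) acc).Pairwise pvLexLe by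
    exact h [] (by simp)
  induction ws with
  | nil => intro acc h; simpa using h
  | cons x t ih =>
    intro acc h
    exact ih _ (pvInsertBy_pairwise_lexle x acc h)

-- Set.ofList keeps a sublist (first occurrences, in order)
theorem pvFoldl_add_sublist {α : Type} [BEq α] (l : List α) :
    ∀ (s : List α), ∃ t, l.foldl PySem.Set.add s = s ++ t ∧ t.Sublist l := by
  induction l with
  | nil => intro s; exact ⟨[], by simp⟩
  | cons x t ih =>
    intro s
    by_cases h : PySem.Set.contains s x = true
    · obtain ⟨u, hu, hs⟩ := ih s
      refine ⟨u, ?_, hs.cons _⟩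
      rw [List.foldl_cons]
      have hadd : PySem.Set.add s x = s := by unfold PySem.Set.add; rw [if_pos h]
      rw [hadd]; exact hu
    · obtain ⟨u, hu, hs⟩ := ih (s ++ [x])
      refine ⟨x :: u, ?_, hs.cons₂ _⟩
      rw [List.foldl_cons]
      have hadd : PySem.Set.add s x = s ++ [x] := by unfold PySem.Set.add; rw [if_neg h]
      rw [hadd]
      simpa using hu

theorem pvOfList_sublist {α : Type} [BEq α] (l : List α) : (PySem.Set.ofList l).Sublist l := by
  obtain ⟨t, ht, hs⟩ := pvFoldl_add_sublist l PySem.Set.empty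
  have : PySem.Set.ofList l = t := by simpa [PySem.Set.ofList, PySem.Set.empty] using ht
  rw [this]; exact hs

-- the grouping loop (A's fold reduces to it)
def pvGrp (ws : List (Int × String)) : PySem.Dict Int (List String) :=
  ws.foldl (fun d p => d.modify p.1 [] (fun l => l ++ [p.2])) PySem.Dict.empty

theorem pvGrp_keys (ws : List (Int × String)) :
    (pvGrp ws).keys = PySem.Set.ofList (ws.map Prod.fst) := by
  unfold pvGrp
  rw [PySem.Dict.keys_foldl_modify_key ws Prod.fst [] (fun _ p => (fun l => l ++ [p.2]))]
  simp [PySem.Set.update, PySem.Set.ofList, PySem.Dict.keys_empty, PySem.Set.empty]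

theorem pvGrp_keys_nodup (ws : List (Int × String)) : (pvGrp ws).keys.Nodup := by
  rw [pvGrp_keys]; exact PySem.Set.nodup_ofList _

theorem pvGrp_getD (ws : List (Int × String)) (t : Int) :
    (pvGrp ws).getD t [] = (ws.filter (fun p => p.1 == t)).map Prod.snd := by
  unfold pvGrp
  rw [PySem.Dict.getD_foldl_modify_append ws PySem.Dict.empty t]
  simp [PySem.Dict.getD_empty]

-- A's loop body is exactly the modify step
theorem pvStepA_eq :
    (fun (d : PySem.Dict Int (List String)) (p : Int × String) =>
      if d.contains p.1 = false then d.insert p.1 [p.2]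
      else d.insert p.1 (d.getD p.1 [] ++ [p.2]))
    = fun d p => d.modify p.1 [] (fun l => l ++ [p.2]) := by
  funext d p
  by_cases h : d.contains p.1
  · simp [h, PySem.Dict.modify]
  · simp only [Bool.not_eq_true] at h
    simp [h, PySem.Dict.modify, PySem.Dict.getD_of_not_contains d _ h]

-- sorted distinct keys of the sorted pair list = sorted(distinct keys)
theorem pvKeys_sorted (ws : List (Int × String)) :
    PySem.Set.ofList ((PySem.List.sorted2 ws Prod.fst Prod.snd false).map Prod.fst)
      = PySem.List.sorted (PySem.Set.ofList (ws.map Prod.fst)) (fun t => t) false := by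
  apply Eq.symm
  apply PySem.List.sorted_eq_of_perm_of_pairwise_lt
  · rw [List.perm_ext_iff_of_nodup (PySem.Set.nodup_ofList _) (PySem.Set.nodup_ofList _)]
    intro a
    rw [PySem.Set.mem_ofList, PySem.Set.mem_ofList, List.mem_map, List.mem_map]
    constructor
    · rintro ⟨p, hp, rfl⟩; exact ⟨p, (PySem.List.sorted2_perm ws Prod.fst Prod.snd false).mem_iff.mp hp, rfl⟩
    · rintro ⟨p, hp, rfl⟩; exact ⟨p, (PySem.List.sorted2_perm ws Prod.fst Prod.snd false).mem_iff.mpr hp, rfl⟩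
  · -- Pairwise (<): sublist of a nondecreasing list, plus nodup
    have hle : ((PySem.List.sorted2 ws Prod.fst Prod.snd false).map Prod.fst).Pairwise (· ≤ ·) := by
      rw [List.pairwise_map]
      exact (pvSorted2_pairwise ws).imp (by
        intro a b h
        rcases h with h | ⟨h, _⟩
        · exact h.le
        · exact h.le)
    have hsub := List.Pairwise.sublist (pvOfList_sublist ((PySem.List.sorted2 ws Prod.fst Prod.snd false).map Prod.fst)) hle
    have hnd : (PySem.Set.ofList ((PySem.List.sorted2 ws Prod.fst Prod.snd false).map Prod.fst)).Pairwise (· ≠ ·) :=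
      PySem.Set.nodup_ofList _
    exact (hsub.and hnd).imp (fun h => lt_of_le_of_ne h.1 h.2)

-- group at t of the sorted pair list = sorted(group at t)
theorem pvGroup_sorted (ws : List (Int × String)) (t : Int) :
    ((PySem.List.sorted2 ws Prod.fst Prod.snd false).filter (fun p => p.1 == t)).map Prod.snd
      = PySem.List.sorted ((ws.filter (fun p => p.1 == t)).map Prod.snd) (fun g => g) false := by
  apply Eq.symm
  apply PySem.List.sorted_id_eq_of_perm_of_pairwise
  · exact (((PySem.List.sorted2_perm ws Prod.fst Prod.snd false).filter _).map _)
  · rw [List.pairwise_map]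
    have hpw : ((PySem.List.sorted2 ws Prod.fst Prod.snd false).filter (fun p => p.1 == t)).Pairwise pvLexLe :=
      (pvSorted2_pairwise ws).filter _
    refine hpw.imp_of_mem ?_
    intro a b ha hb h
    have ha' : a.1 = t := by simpa using (List.of_mem_filter ha)
    have hb' : b.1 = t := by simpa using (List.of_mem_filter hb)
    rcases h with h | ⟨_, h⟩
    · exact absurd h (by omega)
    · exact h

theorem pvA_eq (overview : List (String × Int)) (winners : List (String × String)) (json_winners : List (String × String)) :
    winner_summary overview winners json_winners
      = (pvGrp (PySem.List.sorted2 (pvWalletsWin overview winners json_winners) Prod.fst Prod.snd false)).items := by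
  unfold winner_summary pvGrp
  rw [pvStepA_eq]

-- under Pre_, B's per-wallet Optional `or` agrees with A's membership filter + pvGen
theorem pvElem_eq (winners json_winners : List (String × String)) (p : String × Int)
    (h : ¬((PySem.Dict.ofList winners).get? p.1 = some "" ∧ (PySem.Dict.ofList json_winners).get? p.1 = none)) :
    (match altGen winners json_winners p.1 with
     | some g => [(p.2, g)]
     | none => ([] : List (Int × String)))
    = if ((PySem.Dict.ofList winners).contains p.1 || (PySem.Dict.ofList json_winners).contains p.1) then
        [(p.2, pvGen (PySem.Dict.ofList winners) (PySem.Dict.ofList json_winners) p.1)]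
      else [] := by
  unfold altGen pvGen
  rw [PySem.Dict.contains_eq_isSome_get?, PySem.Dict.contains_eq_isSome_get?]
  cases hw : (PySem.Dict.ofList winners).get? p.1 with
  | none =>
    cases hj : (PySem.Dict.ofList json_winners).get? p.1 with
    | none => simp
    | some t => simp
  | some s =>
    by_cases hs : s = ""
    · subst hs
      cases hj : (PySem.Dict.ofList json_winners).get? p.1 with
      | none => exact absurd ⟨hw, hj⟩ h
      | some t => simp
    · simp [hs]

theorem pvPairs_eq_aux (winners json_winners : List (String × String)) (l : List (String × Int)) :
    ∀ (acc : List (Int × String)),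
      (∀ p ∈ l, ¬((PySem.Dict.ofList winners).get? p.1 = some "" ∧ (PySem.Dict.ofList json_winners).get? p.1 = none)) →
      l.foldl (fun acc p =>
          match altGen winners json_winners p.1 with
          | some g => acc ++ [(p.2, g)]
          | none => acc) acc
        = acc ++ (l.filter
            (fun p => (PySem.Dict.ofList winners).contains p.1 || (PySem.Dict.ofList json_winners).contains p.1)).map
            (fun p => (p.2, pvGen (PySem.Dict.ofList winners) (PySem.Dict.ofList json_winners) p.1)) := by
  induction l with
  | nil => intro acc _; simp
  | cons x t ih =>
    intro acc h
    have hx := pvElem_eq winners json_winners x (h x (List.mem_cons_self))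
    have hsplit : (match altGen winners json_winners x.1 with
        | some g => acc ++ [(x.2, g)]
        | none => acc)
        = acc ++ (match altGen winners json_winners x.1 with
        | some g => [(x.2, g)]
        | none => ([] : List (Int × String))) := by
      cases altGen winners json_winners x.1 <;> simp
    rw [List.foldl_cons, ih _ (fun p hp => h p (List.mem_cons_of_mem x hp)), hsplit, hx,
      List.filter_cons, List.append_assoc]
    by_cases hc : ((PySem.Dict.ofList winners).contains x.1 || (PySem.Dict.ofList json_winners).contains x.1) = true <;>
      simp [hc]

theorem pvPairs_eq (overview : List (String × Int)) (winners : List (String × String)) (json_winners : List (String × String))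
    (hpre : Pre_winner_summary overview winners json_winners) :
    altPairs overview winners json_winners = pvWalletsWin overview winners json_winners := by
  unfold altPairs pvWalletsWin
  rw [pvPairs_eq_aux winners json_winners _ [] hpre]
  simp

theorem winner_summary_eq_alt (overview : List (String × Int)) (winners : List (String × String)) (json_winners : List (String × String))
    (hpre : Pre_winner_summary overview winners json_winners) :
    winner_summary overview winners json_winners = winner_summary_alt overview winners json_winners := by
  rw [pvA_eq]
  unfold winner_summary_alt
  rw [pvPairs_eq overview winners json_winners hpre]
  set ws := pvWalletsWin overview winners json_winners with hws
  set sws := PySem.List.sorted2 ws Prod.fst Prod.snd false with hsws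
  rw [PySem.Dict.items_eq_map_keys (pvGrp sws) (pvGrp_keys_nodup sws) []]
  rw [pvGrp_keys sws, pvKeys_sorted ws]
  apply List.map_congr_left
  intro t _
  rw [pvGrp_getD sws t, pvGroup_sorted ws t]

-- ===== VERDICT (by name: the statement is the Claim_ definition above) =====
theorem winner_summary_spec : Claim_equal_winner_summary := by
  intro overview winners json_winners _ hpre
  unfold Spec_winner_summary
  exact winner_summary_eq_alt overview winners json_winners hpre
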